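-- pv_equiv track=rewrite | github.com/oybekabduxalimov/pyhomework | lesson-4/homework/loop3.py | insert_underscores
-- ===== SOURCE A (Python) =====
-- def insert_underscores(txt):
--     vowels = "AEIOUaeiou"
--     result = []
--     count = 0
--
--     for i, char in enumerate(txt):
--         result.append(char)
--         count += 1
--         # Insert underscore after every 3rd non-vowel character
--         if count == 3 and i < len(txt) - 1:
--             if char not in vowels and txt[i + 1] != "_":
--                 result.append("_")
--             count = 0
--
--     return "".join(result)
-- ===== SOURCE B (Python) =====
-- def insert_underscores(txt):
--     vowels = "AEIOUaeiou"
--     parts = []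
--     n = len(txt)
--     for j in range(0, n, 3):
--         chunk = txt[j:j+3]
--         parts.append(chunk)
--         if len(chunk) == 3 and j + 3 < n and txt[j+2] not in vowels and txt[j+3] != "_":
--             parts.append("_")
--     return "".join(parts)
-- ===== Notes on version B (the rewrite author's own statement) =====
-- stated objective: simpler
-- what changed: Replaced A's per-character loop with a running counter reset at 3 by a direct traversal in blocks of three characters that appends each chunk and decides the underscore from the chunk boundary.
import Mathlib
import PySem

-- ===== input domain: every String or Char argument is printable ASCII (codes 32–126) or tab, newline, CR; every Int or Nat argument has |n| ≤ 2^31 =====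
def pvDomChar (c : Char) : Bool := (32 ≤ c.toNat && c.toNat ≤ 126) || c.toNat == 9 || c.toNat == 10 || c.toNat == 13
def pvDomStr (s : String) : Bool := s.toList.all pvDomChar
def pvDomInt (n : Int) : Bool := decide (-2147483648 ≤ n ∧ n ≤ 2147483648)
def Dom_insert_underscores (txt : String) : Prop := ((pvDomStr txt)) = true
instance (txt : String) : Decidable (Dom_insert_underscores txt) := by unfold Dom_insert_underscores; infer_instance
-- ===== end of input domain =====

-- B replaces A's per-character counter loop by a traversal in blocks of three characters (objective: simpler decomposition, same cost).

-- ===== PORT A =====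
-- the for-loop of A: state = (result, count), iterating over enumerate(txt)
def insertGoA (chars vowels : List Char) : List (Int × Char) → List Char → Int → List Char
  | [], result, _ => result
  | (i, char) :: rest, result, count =>
      let result := result ++ [char]
      let count := count + 1
      if count = 3 ∧ i < (chars.length : Int) - 1 then
        let result :=
          if char ∉ vowels ∧ PySem.List.pyGet? chars (i + 1) ≠ some '_' then
            result ++ ['_']
          else result
        insertGoA chars vowels rest result 0
      else
        insertGoA chars vowels rest result count

def insert_underscores (txt : String) : String :=
  String.ofList (insertGoA txt.toList "AEIOUaeiou".toList
    (PySem.List.enumerate txt.toList 0) [] 0)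

-- ===== PORT B =====
-- the chunk loop of B: take a block of three, append it, then decide on the underscore
def altGo (vowels : List Char) : List Char → List Char
  | a :: b :: c :: rest =>
      a :: b :: c ::
        (if rest ≠ [] ∧ c ∉ vowels ∧ rest.head? ≠ some '_' then
          '_' :: altGo vowels rest
        else
          altGo vowels rest)
  | chunk => chunk

def insert_underscores_alt (txt : String) : String :=
  String.ofList (altGo "AEIOUaeiou".toList txt.toList)

-- ===== PRECONDITION & SPEC =====
def Spec_insert_underscores (txt : String) (out : String) : Prop := out = insert_underscores_alt txt
instance (txt : String) (out : String) : Decidable (Spec_insert_underscores txt out) := by unfold Spec_insert_underscores; infer_instance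

-- ===== CLAIM (what is proved, stated in full; the proofs are below) =====
def Claim_equal_insert_underscores : Prop := ∀ (txt : String), Dom_insert_underscores txt → Spec_insert_underscores txt (insert_underscores txt)

-- ===== LEMMAS AND PROOFS =====

lemma goA_eq_altGo (vowels : List Char) :
    ∀ (n : Nat) (l pre result : List Char), l.length ≤ n →
      insertGoA (pre ++ l) vowels (PySem.List.enumerate l (pre.length : Int)) result 0
        = result ++ altGo vowels l := by
  intro n
  induction n with
  | zero =>
      intro l pre result h
      have : l = [] := List.length_eq_zero_iff.mp (Nat.le_zero.mp h)
      subst this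
      simp [insertGoA, altGo, PySem.List.enumerate]
  | succ n ih =>
      intro l pre result h
      match l with
      | [] => simp [insertGoA, altGo, PySem.List.enumerate]
      | [a] =>
          simp only [PySem.List.enumerate_cons, PySem.List.enumerate_nil, insertGoA, altGo]
          rw [if_neg (by omega)]
      | [a, b] =>
          simp only [PySem.List.enumerate_cons, PySem.List.enumerate_nil, insertGoA, altGo]
          rw [if_neg (by omega), if_neg (by omega)]
          simp
      | a :: b :: c :: rest =>
          simp only [PySem.List.enumerate_cons, insertGoA]
          rw [if_neg (by omega), if_neg (by omega)]
          match rest with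
          | [] =>
              rw [if_neg (by rintro ⟨-, hlt⟩; simp at hlt; omega)]
              simp [insertGoA, altGo, PySem.List.enumerate]
          | r0 :: rs =>
              rw [if_pos ⟨rfl, by simp; omega⟩]
              have hget : PySem.List.pyGet? (pre ++ a :: b :: c :: r0 :: rs)
                  ((pre.length : Int) + 1 + 1 + 1) = some r0 := by
                have h1 : ((pre.length : Int) + 1 + 1 + 1)
                    = (((pre ++ [a, b, c]).length : Int)) := by simp; ring
                have h2 : pre ++ a :: b :: c :: r0 :: rs
                    = (pre ++ [a, b, c]) ++ r0 :: rs := by simp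
                rw [h1, h2, PySem.List.pyGet?_append_length]
              have hrec :
                  ∀ result', insertGoA (pre ++ a :: b :: c :: r0 :: rs) vowels
                      (PySem.List.enumerate (r0 :: rs) ((pre.length : Int) + 1 + 1 + 1)) result' 0
                    = result' ++ altGo vowels (r0 :: rs) := by
                intro result'
                have h2 : pre ++ a :: b :: c :: r0 :: rs
                    = (pre ++ [a, b, c]) ++ r0 :: rs := by simp
                have h1 : ((pre.length : Int) + 1 + 1 + 1)
                    = (((pre ++ [a, b, c]).length : Int)) := by simp; ring
                rw [h2, h1]
                exact ih (r0 :: rs) (pre ++ [a, b, c]) result' (by simp at h ⊢; omega)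
              by_cases hc : c ∉ vowels ∧ r0 ≠ '_'
              · rw [if_pos (by exact ⟨hc.1, by rw [hget]; simp [hc.2]⟩)]
                rw [hrec]
                rw [show altGo vowels (a :: b :: c :: r0 :: rs)
                      = a :: b :: c :: '_' :: altGo vowels (r0 :: rs) from by
                  rw [altGo]
                  rw [if_pos (by exact ⟨by simp, hc.1, by simp [hc.2]⟩)]]
                simp
              · rw [if_neg (by
                  rw [hget]
                  intro hcon
                  exact hc ⟨hcon.1, by intro he; exact hcon.2 (by rw [he])⟩)]
                rw [hrec]
                rw [show altGo vowels (a :: b :: c :: r0 :: rs)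
                      = a :: b :: c :: altGo vowels (r0 :: rs) from by
                  rw [altGo]
                  rw [if_neg (by
                    intro hcon
                    rcases hcon with ⟨-, h1, h2⟩
                    exact hc ⟨h1, by intro he; exact h2 (by simp [he])⟩)]]
                simp

-- ===== VERDICT (by name: the statement is the Claim_ definition above) =====
theorem insert_underscores_spec : Claim_equal_insert_underscores := by
  intro txt _
  unfold Spec_insert_underscores insert_underscores insert_underscores_alt
  have h := goA_eq_altGo "AEIOUaeiou".toList txt.toList.length txt.toList [] [] le_rfl
  have h2 : insertGoA txt.toList "AEIOUaeiou".toList (PySem.List.enumerate txt.toList 0) [] 0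
      = altGo "AEIOUaeiou".toList txt.toList := by simpa using h
  exact congrArg String.ofList h2
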